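-- pv_equiv track=rewrite | github.com/ske-studio/os32 | tools/img2vbz.py | split_subpaths
-- ===== SOURCE A (Python) =====
-- def split_subpaths(cmds):
--     """closepathでサブパスを分割"""
--     subpaths = []
--     current = []
--     for cmd_type, cmd_data in cmds:
--         current.append((cmd_type, cmd_data))
--         if cmd_type == 'closepath':
--             if len(current) >= 3:
--                 subpaths.append(current)
--             current = []
--     if current and len(current) >= 2:
--         subpaths.append(current)
--     return subpaths if subpaths else [cmds]
-- ===== SOURCE B (Python) =====
-- def split_subpaths(cmds):
--     """closepathでサブパスを分割"""
--     def go(rest):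
--         for k, (cmd_type, _) in enumerate(rest):
--             if cmd_type == 'closepath':
--                 seg = rest[:k + 1]
--                 return ([seg] if len(seg) >= 3 else []) + go(rest[k + 1:])
--         return [rest] if len(rest) >= 2 else []
--     subpaths = go(list(cmds))
--     return subpaths if subpaths else [cmds]
-- ===== Notes on version B (the rewrite author's own statement) =====
-- stated objective: alternative
-- what changed: Replaces A's single accumulator loop (building 'current' element by element) with a recursion on the remaining suffix that finds the next closepath and slices the segment off in one step.
import Mathlib
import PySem

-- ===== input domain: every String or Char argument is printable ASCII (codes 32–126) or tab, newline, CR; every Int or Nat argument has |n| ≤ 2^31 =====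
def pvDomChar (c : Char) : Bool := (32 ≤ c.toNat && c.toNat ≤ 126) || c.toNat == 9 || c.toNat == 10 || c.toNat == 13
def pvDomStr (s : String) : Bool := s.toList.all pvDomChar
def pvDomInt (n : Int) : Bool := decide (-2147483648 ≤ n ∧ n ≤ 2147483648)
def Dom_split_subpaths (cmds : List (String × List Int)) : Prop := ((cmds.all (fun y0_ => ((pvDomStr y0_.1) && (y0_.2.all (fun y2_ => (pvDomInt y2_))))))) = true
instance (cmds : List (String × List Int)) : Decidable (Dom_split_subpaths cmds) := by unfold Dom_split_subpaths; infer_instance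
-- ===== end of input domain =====

-- B replaces A's element-by-element accumulator loop with a recursion on the remaining
-- suffix that finds the next closepath and slices off the whole segment at once (alternative decomposition, same cost).

-- ===== PORT A =====
-- literal port of A's loop: state = (subpaths, current)
def split_subpaths (cmds : List (String × List Int)) : List (List (String × List Int)) :=
  let st := cmds.foldl
    (fun (st : List (List (String × List Int)) × List (String × List Int)) c =>
      let current := st.2 ++ [c]
      if c.1 = "closepath" then
        ((if current.length ≥ 3 then st.1 ++ [current] else st.1), [])
      else (st.1, current)) ([], [])
  let subpaths := if st.2 ≠ [] ∧ st.2.length ≥ 2 then st.1 ++ [st.2] else st.1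
  if subpaths = [] then [cmds] else subpaths

-- ===== PORT B =====
-- Source B's inner `go`: scan for the first closepath (enumerate/return = findIdx?),
-- slice the segment off with take/drop (the Python slices rest[:k+1], rest[k+1:] have
-- nonnegative in-range bounds, so take/drop are exact) and recurse on the tail.
def sp_go (rest : List (String × List Int)) : List (List (String × List Int)) :=
  match h : rest.findIdx? (fun c => c.1 == "closepath") with
  | some k =>
      (if (rest.take (k + 1)).length ≥ 3 then [rest.take (k + 1)] else []) ++
        sp_go (rest.drop (k + 1))
  | none => if rest.length ≥ 2 then [rest] else []
termination_by rest.length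
decreasing_by
  have hk : k < rest.length := List.findIdx?_eq_some_iff_findIdx_eq.mp h |>.1
  simp [List.length_drop]; omega

def split_subpaths_alt (cmds : List (String × List Int)) : List (List (String × List Int)) :=
  let subpaths := sp_go cmds
  if subpaths = [] then [cmds] else subpaths

-- ===== PRECONDITION & SPEC =====
def Spec_split_subpaths (cmds : List (String × List Int)) (out : List (List (String × List Int))) : Prop := out = split_subpaths_alt cmds
instance (cmds : List (String × List Int)) (out : List (List (String × List Int))) : Decidable (Spec_split_subpaths cmds out) := by unfold Spec_split_subpaths; infer_instance

-- ===== CLAIM (what is proved, stated in full; the proofs are below) =====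
def Claim_equal_split_subpaths : Prop := ∀ (cmds : List (String × List Int)), Dom_split_subpaths cmds → Spec_split_subpaths cmds (split_subpaths cmds)

-- ===== LEMMAS AND PROOFS =====

-- A's loop, written as structural recursion carrying the pending `current` segment.
def spA (cur rest : List (String × List Int)) : List (List (String × List Int)) :=
  match rest with
  | [] => if cur ≠ [] ∧ cur.length ≥ 2 then [cur] else []
  | c :: rs =>
      if c.1 = "closepath" then
        (if (cur ++ [c]).length ≥ 3 then [cur ++ [c]] else []) ++ spA [] rs
      else spA (cur ++ [c]) rs

-- sp_go with an already-accumulated prefix glued onto the first segment.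
def spB (cur rest : List (String × List Int)) : List (List (String × List Int)) :=
  match rest.findIdx? (fun c => c.1 == "closepath") with
  | some k =>
      (if (cur ++ rest.take (k + 1)).length ≥ 3 then [cur ++ rest.take (k + 1)] else []) ++
        sp_go (rest.drop (k + 1))
  | none => if (cur ++ rest).length ≥ 2 then [cur ++ rest] else []

theorem spB_nil_cur (rest : List (String × List Int)) : spB [] rest = sp_go rest := by
  rw [sp_go, spB]
  cases rest.findIdx? (fun c => c.1 == "closepath") <;> simp

theorem spA_eq_spB (rest : List (String × List Int)) :
    ∀ cur, spA cur rest = spB cur rest := by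
  induction rest with
  | nil =>
      intro cur
      simp only [spA, spB, List.findIdx?_nil, List.append_nil]
      by_cases h : cur.length ≥ 2
      · have : cur ≠ [] := by intro e; simp [e] at h
        simp [h, this]
      · simp [h]
  | cons c rs ih =>
      intro cur
      by_cases hc : c.1 = "closepath"
      · have hfi : List.findIdx? (fun c : String × List Int => c.1 == "closepath") (c :: rs)
            = some 0 := by simp [List.findIdx?_cons, hc]
        simp only [spA, spB, hc, if_pos, hfi, List.take_succ_cons, List.take_zero,
          List.drop_succ_cons, List.drop_zero]
        rw [ih [], spB_nil_cur]
      · have hb : ((fun c : String × List Int => c.1 == "closepath") c) = false := by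
          simp [hc]
        simp only [spA, spB, hc, List.findIdx?_cons, hb]
        rw [ih (cur ++ [c])]
        rw [spB]
        cases hfi : rs.findIdx? (fun c => c.1 == "closepath") with
        | none => simp [List.append_assoc]
        | some k => simp [List.append_assoc]

-- A's fold with arbitrary starting state, finalized, equals subs ++ spA cur rest.
theorem foldA_eq_spA (rest : List (String × List Int)) :
    ∀ (subs : List (List (String × List Int))) (cur : List (String × List Int)),
      (let st := rest.foldl
          (fun (st : List (List (String × List Int)) × List (String × List Int)) c =>
            let current := st.2 ++ [c]
            if c.1 = "closepath" then
              ((if current.length ≥ 3 then st.1 ++ [current] else st.1), [])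
            else (st.1, current)) (subs, cur)
        if st.2 ≠ [] ∧ st.2.length ≥ 2 then st.1 ++ [st.2] else st.1)
      = subs ++ spA cur rest := by
  induction rest with
  | nil =>
      intro subs cur
      simp only [List.foldl_nil, spA]
      split_ifs with h <;> simp
  | cons c rs ih =>
      intro subs cur
      simp only [List.foldl_cons, spA]
      by_cases hc : c.1 = "closepath"
      · simp only [hc, if_pos]
        by_cases h3 : (cur ++ [c]).length ≥ 3
        · simp only [h3, if_pos, ih]
          simp [List.append_assoc]
        · simp only [h3, if_neg, ih, not_false_iff]
          simp
      · simp only [hc, if_neg, not_false_iff, ih]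

-- ===== VERDICT (by name: the statement is the Claim_ definition above) =====
theorem split_subpaths_spec : Claim_equal_split_subpaths := by
  intro cmds _
  unfold Spec_split_subpaths split_subpaths split_subpaths_alt
  have h := foldA_eq_spA cmds [] []
  simp only [] at h ⊢
  rw [h, spA_eq_spB, spB_nil_cur]
  simp
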